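-- pv_equiv track=rewrite | github.com/cyanophycean314-zz/lil-jank | typo.py | typo_generator
-- ===== SOURCE A (Python) =====
-- close_letters = {
--     'q': {'w', 'a'},
--     'a': {'z', 's', 'q'},
--     'z': {'a', 'x'},
--     'w': {'q', 'e'},
--     's': {'a', 'd'},
--     'x': {'z', 'c'},
--     'e': {'w', 'r'},
--     'd': {'s', 'f'},
--     'c': {'x', 'v'},
--     'r': {'e', 't'},
--     'f': {'d', 'g'},
--     'v': {'c', 'b'},
--     't': {'r', 'y'},
--     'g': {'f', 'h'},
--     'b': {'v', 'n'},
--     'y': {'t', 'u'},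
--     'h': {'g', 'j'},
--     'n': {'b', 'm'},
--     'u': {'y', 'i'},
--     'j': {'h', 'k'},
--     'm': {'b', 'm'},
--     'i': {'u', 'o'},
--     'k': {'j', 'l'},
--     'o': {'i', 'p', 'l'},
--     'l': {'k', 'o'},
--     'p': {'o'}
-- }
--
-- def insert_char(s, c, i):
--     assert len(s) > 0 and len(c) == 1 and i in range(0, len(s) + 1)
--     return s[:i] + c + s[i:]
--
-- def replace_char(s, c, i, j):
--     assert len(s) > 0 and i in range(0, len(s)) and j in range(0, len(s))
--     l = list(s)
--     if c == None:
--         l[i], l[j] = l[j], l[i]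
--     else:
--         l[i] = c
--     return ''.join(l)
--
-- def delete_char(s, i):
--     assert len(s) > 0 and i in range(0, len(s))
--     return s[:i] + s[i+1:]
--
-- def typo_generator(s):
--     results = set()
--     results.add(s)
--     results.add(s.replace('-',''))
--     results.add(s)
--
--     for i, char in enumerate(s):
--         fat_finger = close_letters.get(char)
--         if fat_finger != None:
--             for letter in fat_finger:
--                 results.add(insert_char(s, letter, i))
--                 results.add(insert_char(s, letter, i+1))
--                 results.add(replace_char(s, letter, i, i))
--
--         results.add(delete_char(s, i))
--         results.add(insert_char(s, '-', i))
--
--         for j, _ in enumerate(s):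
--             results.add(insert_char(s, char, j))
--             results.add(replace_char(s, None, i, j))
--     return results
-- ===== SOURCE B (Python) =====
-- # B: recursive zipper over the split points of s (prefix / focus char / suffix)
-- # building every variant by pure string concatenation; no indices, no slicing,
-- # no mutation helpers.  Swaps of positions i>j are skipped (swap is symmetric and
-- # swap(j,i) was already produced while the focus was at j); swap(i,i)=s is
-- # already in the set.  Deduplication happens once via set() at the end.
-- close_letters = {
--     'q': {'w', 'a'},
--     'a': {'z', 's', 'q'},
--     'z': {'a', 'x'},
--     'w': {'q', 'e'},
--     's': {'a', 'd'},
--     'x': {'z', 'c'},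
--     'e': {'w', 'r'},
--     'd': {'s', 'f'},
--     'c': {'x', 'v'},
--     'r': {'e', 't'},
--     'f': {'d', 'g'},
--     'v': {'c', 'b'},
--     't': {'r', 'y'},
--     'g': {'f', 'h'},
--     'b': {'v', 'n'},
--     'y': {'t', 'u'},
--     'h': {'g', 'j'},
--     'n': {'b', 'm'},
--     'u': {'y', 'i'},
--     'j': {'h', 'k'},
--     'm': {'b', 'm'},
--     'i': {'u', 'o'},
--     'k': {'j', 'l'},
--     'o': {'i', 'p', 'l'},
--     'l': {'k', 'o'},
--     'p': {'o'}
-- }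
--
--
-- def typo_generator(s):
--     def pre_inserts(c, done, todo, rest):
--         # insert the focus char c at every split point strictly inside the prefix
--         if not todo:
--             return []
--         return [done + c + todo + rest] + \
--             pre_inserts(c, done + todo[0], todo[1:], rest)
--
--     def tail(pre, c, mid, rest):
--         # walk the suffix: s = pre + c + mid + rest; at each step emit the
--         # insertion of c before rest and the swap of the focus with rest[0]
--         if not rest:
--             return []
--         d, rest2 = rest[0], rest[1:]
--         return [pre + c + mid + c + rest,
--                 pre + d + mid + c + rest2] + tail(pre, c, mid + d, rest2)
--
--     def chunk(pre, c, suf):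
--         # every variant arising at the split s = pre + c + suf
--         fat = [v for letter in close_letters.get(c, ())
--                  for v in (pre + letter + c + suf,
--                            pre + c + letter + suf,
--                            pre + letter + suf)]
--         return fat + [pre + suf, pre + '-' + c + suf] + \
--             pre_inserts(c, '', pre, c + suf) + \
--             [pre + c + c + suf] + tail(pre, c, '', suf)
--
--     def walk(pre, rest):
--         if not rest:
--             return []
--         c, suf = rest[0], rest[1:]
--         return chunk(pre, c, suf) + walk(pre + c, suf)
--
--     return set([s, s.replace('-', '')] + walk('', s))
-- ===== Notes on version B (the rewrite author's own statement) =====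
-- stated objective: alternative
-- what changed: B replaces A's index-driven nested loops over assert-guarded slicing/list-mutation helpers by a recursive zipper over the split points of the string (prefix / focus char / suffix), building every variant by pure concatenation with no indices, skipping symmetric duplicate swaps, and deduplicating once at the end.
import Mathlib
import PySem

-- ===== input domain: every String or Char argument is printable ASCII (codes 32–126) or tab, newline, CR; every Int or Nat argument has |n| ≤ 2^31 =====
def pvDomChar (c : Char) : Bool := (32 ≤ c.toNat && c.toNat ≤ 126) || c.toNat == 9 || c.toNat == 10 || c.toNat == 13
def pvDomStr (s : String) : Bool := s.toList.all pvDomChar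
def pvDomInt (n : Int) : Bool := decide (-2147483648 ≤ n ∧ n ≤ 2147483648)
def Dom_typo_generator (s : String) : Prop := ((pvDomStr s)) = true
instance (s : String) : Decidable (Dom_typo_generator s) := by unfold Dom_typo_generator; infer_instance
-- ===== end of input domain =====

-- B rebuilds the same typo set by a recursive zipper over the split points of s
-- (prefix / focus char / suffix), emitting every variant by pure concatenation
-- (no indices, no slicing, no list mutation) and deduplicating once at the end;
-- symmetric duplicate swaps are skipped.

-- module-level table used by both Python files; each Python set literal kept in
-- its source order (Python set iteration order is not observable here: the
-- letters only feed further set insertions)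
def close_letters : PySem.Dict Char (List Char) :=
  PySem.Dict.mk
  [('q', ['w','a']), ('a', ['z','s','q']), ('z', ['a','x']), ('w', ['q','e']),
   ('s', ['a','d']), ('x', ['z','c']), ('e', ['w','r']), ('d', ['s','f']),
   ('c', ['x','v']), ('r', ['e','t']), ('f', ['d','g']), ('v', ['c','b']),
   ('t', ['r','y']), ('g', ['f','h']), ('b', ['v','n']), ('y', ['t','u']),
   ('h', ['g','j']), ('n', ['b','m']), ('u', ['y','i']), ('j', ['h','k']),
   ('m', ['b','m']), ('i', ['u','o']), ('k', ['j','l']), ('o', ['i','p','l']),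
   ('l', ['k','o']), ('p', ['o'])]

-- ===== PORT A =====
-- strings are carried as their character lists (exact: only slicing/indexing is
-- used); the asserts of A's helpers always hold at their call sites and raise
-- nowhere, so they are not ported

-- s[:i] + c + s[i:]
def insert_charL (l : List Char) (c : Char) (i : Int) : List Char :=
  PySem.List.slice l none (some i) ++ [c] ++ PySem.List.slice l (some i) none

-- l = list(s); l[i], l[j] = l[j], l[i]  (c = None)  /  l[i] = c ; ''.join(l)
def replace_charL (l : List Char) (c : Option Char) (i j : Int) : List Char :=
  match c with
  | none   => PySem.List.pySetD (PySem.List.pySetD l i (PySem.List.pyGetD l j ' ')) j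
                (PySem.List.pyGetD l i ' ')
  | some c => PySem.List.pySetD l i c

-- s[:i] + s[i+1:]
def delete_charL (l : List Char) (i : Int) : List Char :=
  PySem.List.slice l none (some i) ++ PySem.List.slice l (some (i+1)) none

-- the 'for letter in fat_finger' loop body
def fatLoopA (l : List Char) (i : Int) (r : List String) (fat_finger : List Char) : List String :=
  fat_finger.foldl (fun r letter =>
    PySem.Set.add (PySem.Set.add (PySem.Set.add r
      (String.ofList (insert_charL l letter i)))
      (String.ofList (insert_charL l letter (i+1))))
      (String.ofList (replace_charL l (some letter) i i))) r

-- the 'for j, _ in enumerate(s)' loop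
def innerLoopA (l : List Char) (i : Int) (char : Char) (r : List String) : List String :=
  (PySem.List.enumerate l).foldl (fun r jc =>
    PySem.Set.add (PySem.Set.add r (String.ofList (insert_charL l char jc.1)))
      (String.ofList (replace_charL l none i jc.1))) r

-- the 'for i, char in enumerate(s)' loop body
def bodyA (l : List Char) (results : List String) (ic : Int × Char) : List String :=
  let i := ic.1
  let char := ic.2
  let results := match PySem.Dict.get? close_letters char with
    | some fat_finger => fatLoopA l i results fat_finger
    | none => results
  let results := PySem.Set.add results (String.ofList (delete_charL l i))
  let results := PySem.Set.add results (String.ofList (insert_charL l '-' i))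
  innerLoopA l i char results

def typo_generator (s : String) : List String :=
  let l := s.toList
  let results : List String :=
    PySem.Set.add (PySem.Set.add (PySem.Set.add PySem.Set.empty s)
      (PySem.Str.replace s "-" "")) s
  (PySem.List.enumerate l).foldl (bodyA l) results

-- ===== PORT B =====
-- pre_inserts(c, done, todo, rest): insert the focus char c at every split
-- point strictly inside the prefix
def preInsB (c : Char) (done todo rest : List Char) : List String :=
  match todo with
  | [] => []
  | d :: todo2 =>
      String.ofList (done ++ [c] ++ todo ++ rest) :: preInsB c (done ++ [d]) todo2 rest

-- tail(pre, c, mid, rest): walk the suffix, emitting the insertion of c and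
-- the swap of the focus with rest[0] at each step
def tailB (pre : List Char) (c : Char) (mid rest : List Char) : List String :=
  match rest with
  | [] => []
  | d :: rest2 =>
      String.ofList (pre ++ [c] ++ mid ++ [c] ++ rest) ::
      String.ofList (pre ++ [d] ++ mid ++ [c] ++ rest2) ::
      tailB pre c (mid ++ [d]) rest2

-- chunk(pre, c, suf): every variant arising at the split s = pre + c + suf
def chunkB (pre : List Char) (c : Char) (suf : List Char) : List String :=
  ((PySem.Dict.get? close_letters c).getD []).flatMap (fun letter =>
     [String.ofList (pre ++ [letter] ++ [c] ++ suf),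
      String.ofList (pre ++ [c] ++ [letter] ++ suf),
      String.ofList (pre ++ [letter] ++ suf)]) ++
  [String.ofList (pre ++ suf), String.ofList (pre ++ ['-'] ++ [c] ++ suf)] ++
  preInsB c [] pre ([c] ++ suf) ++
  (String.ofList (pre ++ [c] ++ [c] ++ suf) :: tailB pre c [] suf)

def walkB (pre rest : List Char) : List String :=
  match rest with
  | [] => []
  | c :: suf => chunkB pre c suf ++ walkB (pre ++ [c]) suf

def typo_generator_alt (s : String) : List String :=
  PySem.Set.ofList ([s, PySem.Str.replace s "-" ""] ++ walkB [] s.toList)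

-- ===== PRECONDITION & SPEC =====
def Spec_typo_generator (s : String) (out : List String) : Prop := out = typo_generator_alt s
instance (s : String) (out : List String) : Decidable (Spec_typo_generator s out) := by unfold Spec_typo_generator; infer_instance

-- ===== CLAIM (what is proved, stated in full; the proofs are below) =====
def Claim_equal_typo_generator : Prop := ∀ (s : String), Dom_typo_generator s → Spec_typo_generator s (typo_generator s)

-- ===== LEMMAS AND PROOFS =====

def addAll (acc xs : List String) : List String := xs.foldl PySem.Set.add acc

theorem addAll_append (acc xs ys : List String) :
    addAll acc (xs ++ ys) = addAll (addAll acc xs) ys := by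
  simp [addAll, List.foldl_append]

theorem mem_addAll_left {x : String} {acc : List String} (xs : List String) (h : x ∈ acc) :
    x ∈ addAll acc xs := by
  induction xs generalizing acc with
  | nil => exact h
  | cons y ys ih =>
    exact ih (by simp [PySem.Set.mem_add, h])

theorem mem_addAll_of_mem {x : String} {xs : List String} (acc : List String) (h : x ∈ xs) :
    x ∈ addAll acc xs := by
  induction xs generalizing acc with
  | nil => cases h
  | cons y ys ih =>
    rcases List.mem_cons.mp h with rfl | h'
    · exact mem_addAll_left ys (by simp [PySem.Set.mem_add])
    · exact ih _ h'

theorem add_eq_of_mem {x : String} {acc : List String} (h : x ∈ acc) :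
    PySem.Set.add acc x = acc := by
  simp [PySem.Set.add, h]

theorem foldl_addAll {α : Type} (xs : List α) (f : α → List String) (acc : List String) :
    xs.foldl (fun a x => addAll a (f x)) acc = addAll acc (xs.flatMap f) := by
  induction xs generalizing acc with
  | nil => rfl
  | cons y ys ih => simp [List.foldl_cons, ih, addAll_append]

-- the add-sequence of A's outer loop body at index i with character ch
def insStr (l : List Char) (i : Int) (c : Char) : String := String.ofList (insert_charL l c i)
def repStr (l : List Char) (i : Int) (c : Char) : String := String.ofList (replace_charL l (some c) i i)
def swapStr (l : List Char) (i j : Int) : String := String.ofList (replace_charL l none i j)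

def chunkA (l : List Char) (i : Int) (ch : Char) : List String :=
  (match PySem.Dict.get? close_letters ch with
   | some fat => fat.flatMap (fun c => [insStr l i c, insStr l (i+1) c, repStr l i c])
   | none => []) ++
  [String.ofList (delete_charL l i), insStr l i '-'] ++
  (PySem.List.pyRange 0 (PySem.List.len l)).flatMap (fun j => [insStr l j ch, swapStr l i j])

theorem fatLoopA_eq (l : List Char) (i : Int) (r : List String) (fat : List Char) :
    fatLoopA l i r fat
      = addAll r (fat.flatMap (fun c => [insStr l i c, insStr l (i+1) c, repStr l i c])) := by
  unfold fatLoopA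
  have h : (fun (r : List String) (letter : Char) =>
      PySem.Set.add (PySem.Set.add (PySem.Set.add r
        (String.ofList (insert_charL l letter i)))
        (String.ofList (insert_charL l letter (i+1))))
        (String.ofList (replace_charL l (some letter) i i)))
      = fun a c => addAll a [insStr l i c, insStr l (i+1) c, repStr l i c] := by
    funext a c; rfl
  rw [h]
  exact foldl_addAll fat _ r

theorem innerLoopA_eq (l : List Char) (i : Int) (ch : Char) (r : List String) :
    innerLoopA l i ch r
      = addAll r ((PySem.List.pyRange 0 (PySem.List.len l)).flatMap
          (fun j => [insStr l j ch, swapStr l i j])) := by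
  unfold innerLoopA
  rw [PySem.List.enumerate_eq_map_pyRange l ' ', List.foldl_map]
  have h : (fun (r : List String) (j : Int) =>
      PySem.Set.add (PySem.Set.add r (String.ofList (insert_charL l ch (j, PySem.List.pyGetD l j ' ').1)))
        (String.ofList (replace_charL l none i (j, PySem.List.pyGetD l j ' ').1)))
      = fun a j => addAll a [insStr l j ch, swapStr l i j] := by
    funext a j; rfl
  rw [h]
  exact foldl_addAll _ _ r

theorem bodyA_eq (l : List Char) (r : List String) (ic : Int × Char) :
    bodyA l r ic = addAll r (chunkA l ic.1 ic.2) := by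
  rcases ic with ⟨i, ch⟩
  unfold bodyA chunkA
  cases h : PySem.Dict.get? close_letters ch <;>
    simp [h, fatLoopA_eq, innerLoopA_eq, addAll, insStr]

theorem A_eq (s : String) :
    typo_generator s
      = addAll [] ([s, PySem.Str.replace s "-" "", s] ++
          (PySem.List.pyRange 0 (PySem.List.len s.toList)).flatMap
            (fun i => chunkA s.toList i (PySem.List.pyGetD s.toList i ' '))) := by
  show (PySem.List.enumerate s.toList).foldl (bodyA s.toList)
      (PySem.Set.add (PySem.Set.add (PySem.Set.add PySem.Set.empty s)
        (PySem.Str.replace s "-" "")) s) = _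
  rw [addAll_append]
  have hb : bodyA s.toList = fun r ic => addAll r (chunkA s.toList ic.1 ic.2) := by
    funext r ic; exact bodyA_eq s.toList r ic
  rw [hb, PySem.List.enumerate_eq_map_pyRange s.toList ' ', List.foldl_map]
  exact foldl_addAll _ _ _

-- split-point facts: indexing / setting / slicing at the length of the prefix
theorem getD_split (pre suf : List Char) (c d : Char) :
    (pre ++ c :: suf).getD pre.length d = c := by
  induction pre with
  | nil => rfl
  | cons a t ih => simpa using ih

theorem set_split (pre suf : List Char) (c x : Char) :
    (pre ++ c :: suf).set pre.length x = pre ++ x :: suf := by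
  induction pre with
  | nil => rfl
  | cons a t ih => simpa using ih

theorem take_split (pre z : List Char) : (pre ++ z).take pre.length = pre := by
  induction pre with
  | nil => rfl
  | cons a t ih => simpa using ih

theorem drop_split (pre z : List Char) : (pre ++ z).drop pre.length = z := by
  induction pre with
  | nil => rfl
  | cons a t ih => simpa using ih

theorem pyGetD_split (pre suf : List Char) (c : Char) :
    PySem.List.pyGetD (pre ++ c :: suf) (pre.length : Int) ' ' = c := by
  rw [PySem.List.pyGetD_of_nonneg _ ' ' (by positivity)]
  simpa using getD_split pre suf c ' '

theorem ins_split (done z : List Char) (c : Char) :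
    insert_charL (done ++ z) c (done.length : Int) = done ++ [c] ++ z := by
  simp [insert_charL, PySem.List.slice_to_natCast, PySem.List.slice_from_natCast,
    take_split, drop_split]

theorem rep_split (pre suf : List Char) (c x : Char) :
    replace_charL (pre ++ c :: suf) (some x) (pre.length : Int) (pre.length : Int)
      = pre ++ x :: suf := by
  simp [replace_charL, set_split]

theorem del_split (pre suf : List Char) (c : Char) :
    delete_charL (pre ++ c :: suf) (pre.length : Int) = pre ++ suf := by
  have h1 : ((pre.length : Int) + 1) = (((pre ++ [c]).length : Nat) : Int) := by simp
  rw [delete_charL, h1, PySem.List.slice_to_natCast, PySem.List.slice_from_natCast,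
    take_split, show pre ++ c :: suf = (pre ++ [c]) ++ suf by simp, drop_split]

-- swap of the focus (at |pre|) with the character at |pre| + 1 + |mid|
theorem swap_split_nat (pre mid rest2 : List Char) (c d : Char) :
    (((pre ++ c :: (mid ++ d :: rest2)).set pre.length
        ((pre ++ c :: (mid ++ d :: rest2)).getD (pre.length + 1 + mid.length) ' ')).set
      (pre.length + 1 + mid.length)
      ((pre ++ c :: (mid ++ d :: rest2)).getD pre.length ' '))
    = pre ++ d :: (mid ++ c :: rest2) := by
  induction pre with
  | nil =>
    simp only [List.nil_append, List.length_nil, Nat.zero_add, List.getD_cons_zero,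
      List.set_cons_zero]
    rw [show 1 + mid.length = mid.length + 1 by omega]
    rw [List.getD_cons_succ, List.set_cons_succ, getD_split, set_split]
  | cons a t ih =>
    simp only [List.cons_append, List.length_cons]
    rw [show t.length + 1 + 1 + mid.length = (t.length + 1 + mid.length) + 1 by omega]
    simp only [List.getD_cons_succ, List.set_cons_succ, List.cons.injEq]
    exact ⟨trivial, ih⟩

theorem swap_split (pre mid rest2 : List Char) (c d : Char) :
    replace_charL (pre ++ c :: (mid ++ d :: rest2)) none (pre.length : Int)
        ((pre.length : Int) + 1 + (mid.length : Int))
      = pre ++ d :: (mid ++ c :: rest2) := by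
  have hInt : ((pre.length : Int) + 1 + (mid.length : Int))
      = ((pre.length + 1 + mid.length : Nat) : Int) := by push_cast; ring
  rw [replace_charL, hInt,
    PySem.List.pyGetD_of_nonneg _ ' ' (by positivity),
    PySem.List.pyGetD_of_nonneg _ ' ' (by positivity),
    PySem.List.pySetD_of_nonneg _ _ (by positivity),
    PySem.List.pySetD_of_nonneg _ _ (by positivity)]
  simpa using swap_split_nat pre mid rest2 c d

theorem swap_self (l : List Char) {i : Int} (h0 : 0 ≤ i) :
    replace_charL l none i i = l := by
  simp only [replace_charL, PySem.List.pySetD_of_nonneg _ _ h0,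
    PySem.List.pyGetD_of_nonneg _ _ h0]
  rw [List.set_set]
  by_cases hlt : i.toNat < l.length
  · rw [List.getD_eq_getElem l ' ' hlt]; simp
  · rw [List.set_eq_of_length_le (by omega)]

theorem swap_symm (l : List Char) {i j : Int} (h0 : 0 ≤ i) (h1 : 0 ≤ j) (hne : i ≠ j) :
    replace_charL l none i j = replace_charL l none j i := by
  simp only [replace_charL, PySem.List.pySetD_of_nonneg _ _ h0,
    PySem.List.pySetD_of_nonneg _ _ h1]
  exact List.set_comm _ _ (by omega)

-- phase 2 of the inner loop: from j = i + 1 on, A's pair stream IS tailB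
theorem tail_eq (rest : List Char) : ∀ (mid pre : List Char) (c : Char) (l : List Char) (j : Int),
    l = pre ++ c :: (mid ++ rest) → j = (pre.length : Int) + 1 + (mid.length : Int) →
    ((PySem.List.pyRange j (PySem.List.len l)).flatMap
        (fun t => [insStr l t c, swapStr l (pre.length : Int) t]))
      = tailB pre c mid rest := by
  induction rest with
  | nil =>
    intro mid pre c l j hl hj
    have hlen : PySem.List.len l = (l.length : Int) := rfl
    have : l.length = pre.length + 1 + mid.length := by subst hl; simp; omega
    rw [PySem.List.pyRange_one_eq_nil (by rw [hlen, this]; push_cast; omega)]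
    rfl
  | cons d rest2 ih =>
    intro mid pre c l j hl hj
    have hlen : PySem.List.len l = (l.length : Int) := rfl
    have hll : l.length = pre.length + 1 + mid.length + 1 + rest2.length := by
      subst hl; simp; omega
    have hj2 : j = (((pre ++ c :: mid).length : Nat) : Int) := by
      rw [hj]; push_cast; simp; omega
    rw [PySem.List.pyRange_one_cons (by rw [hlen, hll, hj]; push_cast; omega),
      List.flatMap_cons, tailB]
    have hins : insStr l j c = String.ofList (pre ++ [c] ++ mid ++ [c] ++ (d :: rest2)) := by
      rw [insStr, hj2, show l = (pre ++ c :: mid) ++ (d :: rest2) by rw [hl]; simp,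
        ins_split]
      congr 1; simp
    have hswap : swapStr l (pre.length : Int) j
        = String.ofList (pre ++ [d] ++ mid ++ [c] ++ rest2) := by
      rw [swapStr, hl, hj, swap_split]
      congr 1; simp
    rw [hins, hswap]
    simp only [List.cons_append, List.nil_append]
    congr 1
    congr 1
    exact ih (mid ++ [d]) pre c l (j + 1) (by rw [hl]; simp)
      (by rw [hj]; push_cast; simp; ring)

-- phase 1 of the inner loop: j < i; the swaps are symmetric duplicates already
-- in the accumulator, the inserts are exactly preInsB
theorem preins_eq (todo : List Char) : ∀ (done : List Char) (c : Char) (suf l : List Char)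
    (acc : List String) (i : Int),
    l = done ++ (todo ++ c :: suf) → i = (done.length : Int) + (todo.length : Int) →
    (∀ a b : Int, 0 ≤ a → a < i → 0 ≤ b → b < PySem.List.len l → swapStr l a b ∈ acc) →
    addAll acc ((PySem.List.pyRange (done.length : Int) (PySem.List.len l)).flatMap
        (fun t => [insStr l t c, swapStr l i t]))
      = addAll (addAll acc (preInsB c done todo (c :: suf)))
          ((PySem.List.pyRange i (PySem.List.len l)).flatMap
            (fun t => [insStr l t c, swapStr l i t])) := by
  induction todo with
  | nil =>
    intro done c suf l acc i hl hi hsw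
    have hi0 : i = (done.length : Int) := by rw [hi]; simp
    rw [hi0, show preInsB c done [] (c :: suf) = [] from rfl]
    rfl
  | cons e todo2 ih =>
    intro done c suf l acc i hl hi hsw
    have hlen : PySem.List.len l = (l.length : Int) := rfl
    have hll : l.length = done.length + (todo2.length + 1) + 1 + suf.length := by
      subst hl; simp; omega
    have hdi : (done.length : Int) < i := by rw [hi]; push_cast [List.length_cons]; omega
    have hin : i < PySem.List.len l := by rw [hlen, hll, hi]; push_cast [List.length_cons]; omega
    rw [PySem.List.pyRange_one_cons (by rw [hlen, hll]; push_cast; omega),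
      List.flatMap_cons, addAll_append]
    have hins : insStr l (done.length : Int) c
        = String.ofList (done ++ [c] ++ ((e :: todo2) ++ c :: suf)) := by
      rw [insStr, hl, ins_split]
    have hdrop : addAll acc [insStr l (done.length : Int) c, swapStr l i (done.length : Int)]
        = PySem.Set.add acc (insStr l (done.length : Int) c) := by
      show PySem.Set.add (PySem.Set.add acc _) _ = _
      apply add_eq_of_mem
      rw [swapStr, swap_symm l (by omega) (by positivity) (by omega), ← swapStr]
      exact (by simp [PySem.Set.mem_add,
        hsw (done.length : Int) i (by positivity) hdi (by omega) hin] :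
          swapStr l (done.length : Int) i ∈ PySem.Set.add acc (insStr l (done.length : Int) c))
    rw [hdrop]
    have hih := ih (done ++ [e]) c suf l (PySem.Set.add acc (insStr l (done.length : Int) c)) i
      (by rw [hl]; simp)
      (by rw [hi]; push_cast; simp; ring)
      (fun a b ha hai hb hbl => by
        simp [PySem.Set.mem_add, hsw a b ha hai hb hbl])
    have hcast : (((done ++ [e]).length : Nat) : Int) = (done.length : Int) + 1 := by
      push_cast; simp
    rw [hcast] at hih
    rw [hih, preInsB]
    have : addAll acc (String.ofList (done ++ [c] ++ (e :: todo2) ++ (c :: suf)) ::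
        preInsB c (done ++ [e]) todo2 (c :: suf))
        = addAll (PySem.Set.add acc (insStr l (done.length : Int) c))
            (preInsB c (done ++ [e]) todo2 (c :: suf)) := by
      show addAll (PySem.Set.add acc _) _ = _
      rw [hins]
      congr 3
      simp
    rw [this]

-- one outer iteration: A's add-sequence and B's chunk add the same set
theorem chunk_eq (pre : List Char) (c : Char) (suf l : List Char) (acc : List String)
    (hl : l = pre ++ c :: suf)
    (hs : String.ofList l ∈ acc)
    (hsw : ∀ a b : Int, 0 ≤ a → a < (pre.length : Int) → 0 ≤ b → b < PySem.List.len l →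
      swapStr l a b ∈ acc) :
    addAll acc (chunkA l (pre.length : Int) c) = addAll acc (chunkB pre c suf) := by
  have hlen : PySem.List.len l = (l.length : Int) := rfl
  have hll : l.length = pre.length + 1 + suf.length := by subst hl; simp; omega
  have hin : (pre.length : Int) < PySem.List.len l := by rw [hlen, hll]; push_cast; omega
  -- the fat-finger, delete and dash segments are equal element by element
  have hfat : (match PySem.Dict.get? close_letters c with
      | some fat => fat.flatMap (fun x => [insStr l (pre.length : Int) x,
          insStr l ((pre.length : Int) + 1) x, repStr l (pre.length : Int) x])
      | none => ([] : List String))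
      = ((PySem.Dict.get? close_letters c).getD []).flatMap (fun letter =>
          [String.ofList (pre ++ [letter] ++ [c] ++ suf),
           String.ofList (pre ++ [c] ++ [letter] ++ suf),
           String.ofList (pre ++ [letter] ++ suf)]) := by
    have hfun : (fun x => [insStr l (pre.length : Int) x,
        insStr l ((pre.length : Int) + 1) x, repStr l (pre.length : Int) x])
        = (fun letter =>
          [String.ofList (pre ++ [letter] ++ [c] ++ suf),
           String.ofList (pre ++ [c] ++ [letter] ++ suf),
           String.ofList (pre ++ [letter] ++ suf)]) := by
      funext x
      have h1 : insStr l (pre.length : Int) x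
          = String.ofList (pre ++ [x] ++ [c] ++ suf) := by
        rw [insStr, hl, ins_split]; congr 1; simp
      have h2 : insStr l ((pre.length : Int) + 1) x
          = String.ofList (pre ++ [c] ++ [x] ++ suf) := by
        rw [insStr, show ((pre.length : Int) + 1) = (((pre ++ [c]).length : Nat) : Int) by simp,
          show l = (pre ++ [c]) ++ suf by rw [hl]; simp, ins_split]
      have h3 : repStr l (pre.length : Int) x = String.ofList (pre ++ [x] ++ suf) := by
        rw [repStr, hl, rep_split]; congr 1; simp
      rw [h1, h2, h3]
    cases PySem.Dict.get? close_letters c with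
    | none => rfl
    | some fat => rw [Option.getD_some, hfun]
  have hdel : String.ofList (delete_charL l (pre.length : Int))
      = String.ofList (pre ++ suf) := by rw [hl, del_split]
  have hdash : insStr l (pre.length : Int) '-'
      = String.ofList (pre ++ ['-'] ++ [c] ++ suf) := by
    rw [insStr, hl, ins_split]; congr 1; simp
  rw [chunkA, chunkB, hfat, hdel, hdash, addAll_append, addAll_append, addAll_append,
    addAll_append, addAll_append]
  -- acc1: after the fat / delete / dash segment (identical on both sides)
  set acc1 := addAll (addAll acc
    (((PySem.Dict.get? close_letters c).getD []).flatMap (fun letter =>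
      [String.ofList (pre ++ [letter] ++ [c] ++ suf),
       String.ofList (pre ++ [c] ++ [letter] ++ suf),
       String.ofList (pre ++ [letter] ++ suf)])))
    [String.ofList (pre ++ suf), String.ofList (pre ++ ['-'] ++ [c] ++ suf)] with hacc1
  have hs1 : String.ofList l ∈ acc1 := mem_addAll_left _ (mem_addAll_left _ hs)
  have hsw1 : ∀ a b : Int, 0 ≤ a → a < (pre.length : Int) → 0 ≤ b → b < PySem.List.len l →
      swapStr l a b ∈ acc1 :=
    fun a b ha hai hb hbl => mem_addAll_left _ (mem_addAll_left _ (hsw a b ha hai hb hbl))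
  -- phase 1: the prefix positions
  have hph1 := preins_eq pre [] c suf l acc1 (pre.length : Int)
    (by rw [hl]; simp) (by simp) (by simpa using hsw1)
  simp only [List.length_nil, Nat.cast_zero] at hph1
  rw [hph1]
  -- position i itself: the insert is kept, the self-swap is a duplicate of s
  rw [PySem.List.pyRange_one_cons hin, List.flatMap_cons, addAll_append]
  have hinsi : insStr l (pre.length : Int) c
      = String.ofList (pre ++ [c] ++ [c] ++ suf) := by
    rw [insStr, hl, ins_split]; congr 1; simp
  have hdropi : addAll (addAll acc1 (preInsB c [] pre (c :: suf)))
      [insStr l (pre.length : Int) c, swapStr l (pre.length : Int) (pre.length : Int)]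
      = PySem.Set.add (addAll acc1 (preInsB c [] pre (c :: suf)))
          (insStr l (pre.length : Int) c) := by
    show PySem.Set.add (PySem.Set.add _ _) _ = _
    apply add_eq_of_mem
    rw [swapStr, swap_self l (by positivity)]
    simp [PySem.Set.mem_add, mem_addAll_left _ hs1]
  rw [hdropi]
  -- phase 2: the suffix positions are exactly tailB
  rw [tail_eq suf [] pre c l ((pre.length : Int) + 1) (by rw [hl]; simp) (by simp)]
  rw [hinsi]
  rfl

-- the outer loop
theorem walk_eq (rest : List Char) : ∀ (pre l : List Char) (acc : List String),
    l = pre ++ rest →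
    String.ofList l ∈ acc →
    (∀ a b : Int, 0 ≤ a → a < (pre.length : Int) → 0 ≤ b → b < PySem.List.len l →
      swapStr l a b ∈ acc) →
    addAll acc ((PySem.List.pyRange (pre.length : Int) (PySem.List.len l)).flatMap
        (fun t => chunkA l t (PySem.List.pyGetD l t ' ')))
      = addAll acc (walkB pre rest) := by
  induction rest with
  | nil =>
    intro pre l acc hl hs hsw
    have hlen : PySem.List.len l = (l.length : Int) := rfl
    have he : l.length = pre.length := by subst hl; simp
    rw [PySem.List.pyRange_one_eq_nil (by rw [hlen, he])]
    rfl
  | cons c suf ih =>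
    intro pre l acc hl hs hsw
    have hlen : PySem.List.len l = (l.length : Int) := rfl
    have hll : l.length = pre.length + 1 + suf.length := by subst hl; simp; omega
    have hin : (pre.length : Int) < PySem.List.len l := by rw [hlen, hll]; push_cast; omega
    rw [PySem.List.pyRange_one_cons hin, List.flatMap_cons, addAll_append, walkB, addAll_append]
    have hget : PySem.List.pyGetD l (pre.length : Int) ' ' = c := by
      rw [hl]; exact pyGetD_split pre suf c
    rw [hget, chunk_eq pre c suf l acc hl hs hsw]
    have hs2 : String.ofList l ∈ addAll acc (chunkB pre c suf) := mem_addAll_left _ hs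
    -- every swap of the focus with a later position occurs inside tailB
    have hswmem : ∀ b : Int, (pre.length : Int) < b → b < PySem.List.len l →
        swapStr l (pre.length : Int) b ∈ chunkB pre c suf := by
      intro b hb1 hb2
      unfold chunkB
      refine List.mem_append.mpr (Or.inr (List.mem_cons.mpr (Or.inr ?_)))
      rw [← tail_eq suf [] pre c l ((pre.length : Int) + 1) (by rw [hl]; simp) (by simp)]
      exact List.mem_flatMap.mpr ⟨b, PySem.List.mem_pyRange_one.mpr ⟨by omega, hb2⟩, by simp⟩
    have hsw2 : ∀ a b : Int, 0 ≤ a → a < (((pre ++ [c]).length : Nat) : Int) → 0 ≤ b →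
        b < PySem.List.len l → swapStr l a b ∈ addAll acc (chunkB pre c suf) := by
      intro a b ha hai hb hbl
      have hai' : a < (pre.length : Int) + 1 := by
        have : (((pre ++ [c]).length : Nat) : Int) = (pre.length : Int) + 1 := by push_cast; simp
        omega
      by_cases hcase : a < (pre.length : Int)
      · exact mem_addAll_left _ (hsw a b ha hcase hb hbl)
      · have haeq : a = (pre.length : Int) := by omega
        subst haeq
        by_cases hbc : (pre.length : Int) < b
        · exact mem_addAll_of_mem _ (hswmem b hbc hbl)
        · by_cases hbe : b = (pre.length : Int)
          · rw [swapStr, hbe, swap_self l (by positivity)]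
            exact mem_addAll_left _ hs
          · rw [swapStr, swap_symm l (by positivity) hb (by omega)]
            exact mem_addAll_left _ (hsw b _ hb (by omega) (by positivity) hin)
    have hih := ih (pre ++ [c]) l (addAll acc (chunkB pre c suf)) (by rw [hl]; simp) hs2 hsw2
    have hihcast : (((pre ++ [c]).length : Nat) : Int) = (pre.length : Int) + 1 := by
      push_cast; simp
    rw [hihcast] at hih
    exact hih

-- ===== VERDICT (by name: the statement is the Claim_ definition above) =====
theorem typo_generator_spec : Claim_equal_typo_generator := by
  intro s _
  unfold Spec_typo_generator
  rw [A_eq]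
  have hB : typo_generator_alt s
      = addAll [] ([s, PySem.Str.replace s "-" ""] ++ walkB [] s.toList) := by
    simp [typo_generator_alt, PySem.Set.ofList_eq_foldl, addAll]
  rw [hB, addAll_append, addAll_append]
  have h3 : addAll ([] : List String) [s, PySem.Str.replace s "-" "", s]
      = addAll [] [s, PySem.Str.replace s "-" ""] := by
    simp only [addAll, List.foldl_cons, List.foldl_nil]
    exact add_eq_of_mem (by simp [PySem.Set.mem_add])
  rw [h3]
  have hmem : String.ofList s.toList ∈ addAll ([] : List String) [s, PySem.Str.replace s "-" ""] := by
    simp [addAll, List.foldl_cons, List.foldl_nil, PySem.Set.mem_add]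
  have := walk_eq s.toList [] s.toList (addAll [] [s, PySem.Str.replace s "-" ""])
    (by simp) hmem (fun a b ha hai _ _ => absurd hai (by simp at hai ⊢; omega))
  simpa using this
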